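-- pv_equiv track=rewrite | github.com/jefferyUstc/chinacolor-python | chinacolor/palettes.py | _diverging_center_out
-- ===== SOURCE A (Python) =====
-- from typing import Any, Dict, Iterable, List, Optional, Tuple, Union
--
-- def _diverging_center_out(base: List[str], n: int) -> List[str]:
--     m = len(base)
--     if n >= m:
--         return base[:n]
--     mid = (m - 1) // 2  # 0-based center
--     if n == 1:
--         return [base[mid]]
--     left = []
--     right = []
--     # expand from center
--     li = mid - 1
--     ri = mid + 1
--     out = [base[mid]]
--     while len(out) < n:
--         if li >= 0:
--             out.append(base[li])
--             if len(out) >= n: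
--                 break
--             li -= 1
--         if ri < m:
--             out.append(base[ri])
--             ri += 1
--         if li < 0 and ri >= m:
--             break
--     # keep original left-to-right order as in base (not symmetrical around center),
--     # but since we appended center, then left, then right, we should re-order by their index
--     idxs = [base.index(c) for c in out]
--     sorted_pairs = sorted(zip(idxs, out))
--     return [c for _, c in sorted_pairs][:n]
-- ===== SOURCE B (Python) =====
-- def _diverging_center_out(base, n):
--     m = len(base)
--     if n >= m:
--         return base[:n]
--     mid = (m - 1) // 2
--     start = mid - n // 2
--     sel = base[start:start + n]
--     pairs = sorted((base.index(c), c) for c in sel)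
--     return [c for _, c in pairs]
-- ===== Notes on version B (the rewrite author's own statement) =====
-- stated objective: simpler
-- what changed: B replaces A's center-out expansion while-loop (li/ri pointers, break conditions, n==1 special case) by a closed-form contiguous slice base[mid-n//2 : mid-n//2+n] followed by the same sort-by-(first index, color) reordering.
import Mathlib
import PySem

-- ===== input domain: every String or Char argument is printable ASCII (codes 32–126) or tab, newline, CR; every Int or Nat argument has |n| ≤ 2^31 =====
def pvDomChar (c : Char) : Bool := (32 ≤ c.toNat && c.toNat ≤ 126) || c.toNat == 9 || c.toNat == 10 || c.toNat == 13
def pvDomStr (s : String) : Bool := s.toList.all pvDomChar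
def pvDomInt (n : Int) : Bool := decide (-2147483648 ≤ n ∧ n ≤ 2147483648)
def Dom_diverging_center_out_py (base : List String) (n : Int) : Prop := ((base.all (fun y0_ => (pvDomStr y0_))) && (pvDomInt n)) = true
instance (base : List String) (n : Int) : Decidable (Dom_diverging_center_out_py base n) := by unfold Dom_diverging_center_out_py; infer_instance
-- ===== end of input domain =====

-- B replaces A's center-out expansion while-loop by a closed-form contiguous slice plus the
-- same sort-by-(first index, color) reordering (objective: simpler).

-- ===== PORT A =====

-- the while-loop of A: state (li, ri, out); every Python branch in order.
-- base[li] / base[ri] are ported as pyGetD (always in range when evaluated under Pre_).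
def pvLoopA (base : List String) (n m li ri : Int) (out : List String) : List String :=
  if _h : (out.length : Int) < n then
    if 0 ≤ li then
      if n ≤ ((out ++ [PySem.List.pyGetD base li ""]).length : Int) then
        out ++ [PySem.List.pyGetD base li ""]
      else
        if ri < m then
          if li - 1 < 0 ∧ m ≤ ri + 1 then
            (out ++ [PySem.List.pyGetD base li ""]) ++ [PySem.List.pyGetD base ri ""]
          else
            pvLoopA base n m (li - 1) (ri + 1)
              ((out ++ [PySem.List.pyGetD base li ""]) ++ [PySem.List.pyGetD base ri ""])
        else
          if li - 1 < 0 ∧ m ≤ ri then out ++ [PySem.List.pyGetD base li ""]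
          else pvLoopA base n m (li - 1) ri (out ++ [PySem.List.pyGetD base li ""])
    else
      if ri < m then
        if li < 0 ∧ m ≤ ri + 1 then out ++ [PySem.List.pyGetD base ri ""]
        else pvLoopA base n m li (ri + 1) (out ++ [PySem.List.pyGetD base ri ""])
      else
        if li < 0 ∧ m ≤ ri then out else pvLoopA base n m li ri out
  else out
termination_by (n - out.length).toNat
decreasing_by
  all_goals first
    | (simp only [List.length_append, List.length_cons, List.length_nil] at *; omega)
    | omega


-- base.index(c) is always found here, so (index? …).getD 0 never takes the default
def diverging_center_out_py (base : List String) (n : Int) : List String :=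
  let m : Int := base.length
  if n ≥ m then PySem.List.slice base none (some n)
  else
    let mid := PySem.Int.floordiv (m - 1) 2
    if n = 1 then [PySem.List.pyGetD base mid ""]
    else
      let out := pvLoopA base n m (mid - 1) (mid + 1) [PySem.List.pyGetD base mid ""]
      let idxs := out.map (fun c => (((PySem.List.index? base c).getD 0 : Nat) : Int))
      let sorted_pairs := PySem.List.sorted2 (idxs.zip out) Prod.fst Prod.snd
      PySem.List.slice (sorted_pairs.map (fun p => p.2)) none (some n)

-- ===== PORT B =====
def diverging_center_out_py_alt (base : List String) (n : Int) : List String :=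
  let m : Int := base.length
  if n ≥ m then PySem.List.slice base none (some n)
  else
    let mid := PySem.Int.floordiv (m - 1) 2
    let start := mid - PySem.Int.floordiv n 2
    let sel := PySem.List.slice base (some start) (some (start + n))
    let pairs := PySem.List.sorted2
      (sel.map (fun c => ((((PySem.List.index? base c).getD 0 : Nat) : Int), c))) Prod.fst Prod.snd
    pairs.map (fun p => p.2)


-- ===== PRECONDITION & SPEC =====
-- Pre_ excludes only base = [] with n < 0, where Python A raises IndexError (base[mid] on []).
def Pre_diverging_center_out_py (base : List String) (n : Int) : Prop := ¬ (base = [] ∧ n < 0)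
instance (base : List String) (n : Int) : Decidable (Pre_diverging_center_out_py base n) := by
  unfold Pre_diverging_center_out_py; infer_instance

def pvWitness_diverging_center_out_py : List String × Int := (["a", "b", "c", "d", "e"], 3)

def Spec_diverging_center_out_py (base : List String) (n : Int) (out : List String) : Prop := out = diverging_center_out_py_alt base n
instance (base : List String) (n : Int) (out : List String) : Decidable (Spec_diverging_center_out_py base n out) := by unfold Spec_diverging_center_out_py; infer_instance

-- ===== CLAIM (what is proved, stated in full; the proofs are below) =====
def Claim_equal_diverging_center_out_py : Prop := ∀ (base : List String) (n : Int), Dom_diverging_center_out_py base n → Pre_diverging_center_out_py base n → Spec_diverging_center_out_py base n (diverging_center_out_py base n)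


-- ===== LEMMAS AND PROOFS =====
def pvWin (base : List String) (a b : Nat) : List String := (base.drop a).take (b - a)



lemma pvWin_len (base : List String) (a b : Nat) (hb : b ≤ base.length) :
    (pvWin base a b).length = b - a := by
  simp [pvWin]; omega

lemma pvZipSelf {α β : Type} (f : α → β) (l : List α) :
    (l.map f).zip l = l.map (fun c => (f c, c)) := by
  induction l with
  | nil => rfl
  | cons a t ih => simp [ih]

lemma pvSliceTo_nonpos_singleton (x : String) (k : Int) (h : k ≤ 0) :
    PySem.List.slice [x] none (some k) = [] := by
  by_cases h0 : k = 0
  · subst h0; rw [PySem.List.slice_to [x] (le_refl (0:Int))]; rfl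
  · have hk : k = -(((-k).toNat : Nat) : Int) := by omega
    rw [hk, PySem.List.slice_to_neg_natCast _ _ (by omega)]
    simp only [List.length_singleton]
    have h1 : 1 - (-k).toNat = 0 := by omega
    rw [h1, List.take_zero]


lemma pvWin_cons (base : List String) (a b : Nat) (hab : a < b)
    (ha : a < base.length) :
    pvWin base a b = base[a] :: pvWin base (a + 1) b := by
  unfold pvWin
  rw [List.drop_eq_getElem_cons ha]
  have : b - a = (b - (a+1)) + 1 := by omega
  rw [this, List.take_succ_cons]

lemma pvWin_snoc (base : List String) (a b : Nat) (hab : a ≤ b) (hb : b < base.length) :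
    pvWin base a (b + 1) = pvWin base a b ++ [base[b]] := by
  unfold pvWin
  have : b + 1 - a = (b - a) + 1 := by omega
  rw [this, List.take_add_one]
  congr 1
  rw [List.getElem?_drop]
  have : a + (b - a) = b := by omega
  rw [this]
  simp [hb]

lemma pvGetCast (base : List String) (a : Nat) (h : a < base.length) :
    PySem.List.pyGetD base (a : Int) "" = base[a] := by
  rw [PySem.List.pyGetD_natCast]
  exact List.getD_eq_getElem base "" h

lemma pvLoopA_perm (base : List String) (n : Int) (nN : Nat) (hn : n = (nN : Int)) :
    ∀ (r : Nat) (a b : Nat) (out : List String),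
      a ≤ b → b ≤ base.length →
      out.length = b - a →
      out.length + r = nN →
      (r + 1) / 2 ≤ a →
      b + r / 2 ≤ base.length →
      out.Perm (pvWin base a b) →
      (pvLoopA base n (base.length : Int) ((a : Int) - 1) (b : Int) out).Perm
        (pvWin base (a - (r + 1) / 2) (b + r / 2)) := by
  intro r
  induction r using Nat.strong_induction_on with
  | _ r IH =>
    intro a b out hab hb hlen hsum ha2 hb2 hperm
    by_cases hr0 : r = 0
    · subst hr0
      rw [pvLoopA, dif_neg (by omega)]
      simpa using hperm
    · have hg : (out.length : Int) < n := by omega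
      have hli : (0 : Int) ≤ (a : Int) - 1 := by omega
      have ha1 : 1 ≤ a := by omega
      have haL : a - 1 < base.length := by omega
      have hcast : (a : Int) - 1 = ((a - 1 : Nat) : Int) := by omega
      have hgetL : PySem.List.pyGetD base ((a : Int) - 1) "" = base[a - 1] := by
        rw [hcast]; exact pvGetCast base (a - 1) haL
      have hpermL : (out ++ [PySem.List.pyGetD base ((a : Int) - 1) ""]).Perm
          (pvWin base (a - 1) b) := by
        rw [hgetL, pvWin_cons base (a - 1) b (by omega) haL]
        have h1 : (out ++ [base[a - 1]]).Perm (base[a - 1] :: out) :=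
          List.perm_append_singleton _ _
        have h2 : a - 1 + 1 = a := by omega
        rw [h2]
        exact h1.trans (hperm.cons _)
      by_cases hr1 : r = 1
      · subst hr1
        rw [pvLoopA, dif_pos hg, if_pos hli, if_pos (by
          simp only [List.length_append, List.length_cons, List.length_nil]; omega)]
        have e1 : a - (1 + 1) / 2 = a - 1 := by omega
        have e2 : b + 1 / 2 = b := by omega
        rw [e1, e2]
        exact hpermL
      · have hr2 : 2 ≤ r := by omega
        have hbR : b < base.length := by omega
        have hgetR : PySem.List.pyGetD base ((b : Nat) : Int) "" = base[b] :=
          pvGetCast base b hbR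
        have hperm2 : ((out ++ [PySem.List.pyGetD base ((a : Int) - 1) ""])
            ++ [PySem.List.pyGetD base ((b : Nat) : Int) ""]).Perm
            (pvWin base (a - 1) (b + 1)) := by
          rw [hgetR, pvWin_snoc base (a - 1) b (by omega) hbR]
          exact hpermL.append (List.Perm.refl _)
        rw [pvLoopA, dif_pos hg, if_pos hli, if_neg (by
          simp only [List.length_append, List.length_cons, List.length_nil]; omega),
          if_pos (by omega)]
        by_cases hbrk : ((a : Int) - 1 - 1 < 0 ∧ (base.length : Int) ≤ (b : Int) + 1)
        · rw [if_pos hbrk]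
          have hA : a = 1 := by omega
          have hR2 : r = 2 := by omega
          have e1 : a - (r + 1) / 2 = a - 1 := by omega
          have e2 : b + r / 2 = b + 1 := by omega
          rw [e1, e2]
          exact hperm2
        · rw [if_neg hbrk]
          have c1 : (a : Int) - 1 - 1 = ((a - 1 : Nat) : Int) - 1 := by omega
          have c2 : (b : Int) + 1 = ((b + 1 : Nat) : Int) := by omega
          rw [c1, c2]
          have e1 : a - (r + 1) / 2 = (a - 1) - ((r - 2) + 1) / 2 := by omega
          have e2 : b + r / 2 = (b + 1) + (r - 2) / 2 := by omega
          rw [e1, e2]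
          exact IH (r - 2) (by omega) (a - 1) (b + 1) _
            (by omega) (by omega)
            (by simp only [List.length_append, List.length_cons, List.length_nil]; omega)
            (by simp only [List.length_append, List.length_cons, List.length_nil]; omega)
            (by omega) (by omega) hperm2

def pvCmp (p q : Int × String) : Bool :=
  decide (p.1 < q.1) || (!decide (q.1 < p.1) && decide (p.2 < q.2))

lemma pvSorted2_eq_foldl (xs : List (Int × String)) :
    PySem.List.sorted2 xs Prod.fst Prod.snd =
      xs.foldl (fun acc x => PySem.List.insertBy pvCmp x acc) [] := rfl

lemma pvCmp_true_iff (p q : Int × String) :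
    pvCmp p q = true ↔ (p.1 < q.1 ∨ (p.1 = q.1 ∧ p.2 < q.2)) := by
  simp only [pvCmp, Bool.or_eq_true, Bool.and_eq_true, Bool.not_eq_true', decide_eq_true_eq,
    decide_eq_false_iff_not]
  constructor
  · rintro (h | ⟨h1, h2⟩)
    · exact Or.inl h
    · by_cases h3 : p.1 < q.1
      · exact Or.inl h3
      · exact Or.inr ⟨le_antisymm (le_of_not_gt h1) (le_of_not_gt h3), h2⟩
  · rintro (h | ⟨h1, h2⟩)
    · exact Or.inl h
    · exact Or.inr ⟨by omega, h2⟩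

lemma pvCmp_false_iff (p q : Int × String) :
    pvCmp p q = false ↔ ¬ (p.1 < q.1 ∨ (p.1 = q.1 ∧ p.2 < q.2)) := by
  rw [← Bool.not_eq_true, pvCmp_true_iff]

lemma pvCmp_asymm {p q : Int × String} (h : pvCmp p q = true) : pvCmp q p = false := by
  rw [pvCmp_true_iff] at h; rw [pvCmp_false_iff]
  rintro (hc | ⟨hc1, hc2⟩) <;> rcases h with h | ⟨h1, h2⟩
  · omega
  · omega
  · omega
  · exact absurd h2 (lt_asymm hc2)

lemma pvCmp_cross {x y z : Int × String} (hxy : pvCmp x y = true) (hzy : pvCmp z y = false) :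
    pvCmp z x = false := by
  rw [pvCmp_true_iff] at hxy; rw [pvCmp_false_iff] at hzy; rw [pvCmp_false_iff]
  rintro (hc | ⟨hc1, hc2⟩) <;> rcases hxy with h | ⟨h1, h2⟩ <;> apply hzy
  · exact Or.inl (by omega)
  · exact Or.inl (by omega)
  · exact Or.inl (by omega)
  · exact Or.inr ⟨by omega, lt_trans hc2 h2⟩

lemma pvCmp_anti {p q : Int × String} (h1 : pvCmp p q = false) (h2 : pvCmp q p = false) :
    p = q := by
  rw [pvCmp_false_iff] at h1 h2
  push_neg at h1 h2
  have e1 : p.1 = q.1 := by omega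
  have e2 : p.2 = q.2 := le_antisymm (le_of_not_gt fun hc => (h2.2 e1.symm) hc)
    (le_of_not_gt fun hc => (h1.2 e1) hc)
  exact Prod.ext e1 e2

-- R a b := pvCmp b a = false ; insertion keeps Pairwise R
lemma pvInsertBy_pairwise (x : Int × String) (acc : List (Int × String))
    (h : acc.Pairwise (fun a b => pvCmp b a = false)) :
    (PySem.List.insertBy pvCmp x acc).Pairwise (fun a b => pvCmp b a = false) := by
  induction acc with
  | nil => simp [PySem.List.insertBy]
  | cons y ys ih =>
    rw [PySem.List.insertBy]
    rcases List.pairwise_cons.mp h with ⟨hy, hys⟩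
    by_cases hxy : pvCmp x y = true
    · rw [if_pos hxy]
      refine List.pairwise_cons.mpr ⟨?_, h⟩
      intro z hz
      rcases List.mem_cons.mp hz with rfl | hz
      · exact pvCmp_asymm hxy
      · exact pvCmp_cross hxy (hy z hz)
    · rw [if_neg hxy]
      refine List.pairwise_cons.mpr ⟨?_, ih hys⟩
      intro z hz
      rcases (PySem.List.mem_insertBy pvCmp x z ys).mp hz with rfl | hz
      · exact Bool.not_eq_true _ ▸ hxy
      · exact hy z hz

lemma pvSorted2_pairwise (xs : List (Int × String)) :
    (PySem.List.sorted2 xs Prod.fst Prod.snd).Pairwise (fun a b => pvCmp b a = false) := by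
  rw [pvSorted2_eq_foldl]
  suffices h : ∀ acc : List (Int × String), acc.Pairwise (fun a b => pvCmp b a = false) →
      (xs.foldl (fun acc x => PySem.List.insertBy pvCmp x acc) acc).Pairwise
        (fun a b => pvCmp b a = false) by
    exact h [] (by simp)
  induction xs with
  | nil => intro acc h; simpa
  | cons x t ih => intro acc h; exact ih _ (pvInsertBy_pairwise x acc h)

lemma pvSorted2_eq_of_perm (xs ys : List (Int × String)) (h : xs.Perm ys) :
    PySem.List.sorted2 xs Prod.fst Prod.snd = PySem.List.sorted2 ys Prod.fst Prod.snd := by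
  apply List.eq_of_perm_of_sorted (le := fun a b => pvCmp b a = false)
  · intro a b _ _ h1 h2; exact (pvCmp_anti h2 h1)
  · exact pvSorted2_pairwise xs
  · exact pvSorted2_pairwise ys
  · exact ((PySem.List.sorted2_perm xs _ _ _).trans h).trans (PySem.List.sorted2_perm ys _ _ _).symm

lemma pvWin_singleton (base : List String) (a : Nat) (h : a < base.length) :
    pvWin base a (a + 1) = [base[a]] := by
  rw [pvWin_cons base a (a+1) (by omega) h]
  simp [pvWin]
lemma pvMain (base : List String) (n : Int) (hpre : ¬ (base = [] ∧ n < 0)) :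
    diverging_center_out_py base n = diverging_center_out_py_alt base n := by
  by_cases hge : n ≥ (base.length : Int)
  · simp only [diverging_center_out_py, diverging_center_out_py_alt, if_pos hge]
  · have hnl : n < (base.length : Int) := by omega
    have hlen1 : 1 ≤ base.length := by
      by_contra h
      exact hpre ⟨List.eq_nil_of_length_eq_zero (by omega), by omega⟩
    have hmid : PySem.Int.floordiv ((base.length : Int) - 1) 2
        = (((base.length - 1) / 2 : Nat) : Int) := by
      have h1 : (base.length : Int) - 1 = ((base.length - 1 : Nat) : Int) := by omega
      rw [h1]
      exact_mod_cast PySem.Int.floordiv_natCast (base.length - 1) 2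
    have hmidlt : (base.length - 1) / 2 < base.length := by omega
    simp only [diverging_center_out_py, diverging_center_out_py_alt, if_neg hge, hmid]
    by_cases hn1 : n = 1
    · subst hn1
      rw [if_pos rfl]
      have hfd : PySem.Int.floordiv 1 2 = 0 := by decide
      rw [hfd, sub_zero]
      have c2 : (((base.length - 1) / 2 : Nat) : Int) + 1
          = (((base.length - 1) / 2 + 1 : Nat) : Int) := by omega
      rw [c2, PySem.List.slice_natCast]
      have hw : List.take ((base.length - 1) / 2 + 1 - (base.length - 1) / 2)
          (List.drop ((base.length - 1) / 2) base)
          = pvWin base ((base.length - 1) / 2) ((base.length - 1) / 2 + 1) := rfl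
      rw [hw, pvWin_singleton base _ hmidlt, pvGetCast base _ hmidlt]
      rfl
    · rw [if_neg hn1]
      have hfd : PySem.Int.floordiv n 2 = n / 2 :=
        PySem.Int.floordiv_eq_ediv_of_pos (by omega)
      rw [hfd]
      by_cases hn0 : n ≤ 0
      · -- both sides return []
        rw [pvLoopA, dif_neg (by simp only [List.length_cons, List.length_nil]; omega)]
        have hselnil : PySem.List.slice base
            (some ((((base.length - 1) / 2 : Nat) : Int) - n / 2))
            (some ((((base.length - 1) / 2 : Nat) : Int) - n / 2 + n)) = [] := by
          apply List.eq_nil_of_length_eq_zero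
          rw [PySem.List.length_slice]
          simp only [PySem.List.clampIdx]
          split_ifs <;> omega
        rw [hselnil]
        generalize hx : PySem.List.pyGetD base (((base.length - 1) / 2 : Nat) : Int) "" = x
        have hs : PySem.List.sorted2
            ((([x].map (fun c => (((PySem.List.index? base c).getD 0 : Nat) : Int))).zip [x]))
            Prod.fst Prod.snd = [((((PySem.List.index? base x).getD 0 : Nat) : Int), x)] := rfl
        rw [hs]
        rw [show ([((((PySem.List.index? base x).getD 0 : Nat) : Int), x)].map
          (fun p : Int × String => p.2)) = [x] from rfl]
        rw [pvSliceTo_nonpos_singleton x n hn0]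
        rfl
      · -- 2 ≤ n < base.length
        have hn2 : 2 ≤ n := by omega
        have hnn : n = ((n.toNat : Nat) : Int) := by omega
        have hnN2 : 2 ≤ n.toNat := by omega
        have hnNlt : n.toNat < base.length := by omega
        have hmidge : n.toNat / 2 ≤ (base.length - 1) / 2 := by omega
        -- A side: normalize the loop call
        rw [show (((base.length - 1) / 2 : Nat) : Int) + 1
            = (((base.length - 1) / 2 + 1 : Nat) : Int) from by omega]
        rw [pvGetCast base _ hmidlt]
        have hloop := pvLoopA_perm base n n.toNat hnn (n.toNat - 1)
          ((base.length - 1) / 2) ((base.length - 1) / 2 + 1) [base[(base.length - 1) / 2]]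
          (by omega) (by omega)
          (by simp) (by simp; omega)
          (by omega)
          (by omega)
          (by rw [pvWin_singleton base _ hmidlt])
        have e1 : (base.length - 1) / 2 - ((n.toNat - 1) + 1) / 2
            = (base.length - 1) / 2 - n.toNat / 2 := by omega
        have e2 : ((base.length - 1) / 2 + 1) + (n.toNat - 1) / 2
            = ((base.length - 1) / 2 - n.toNat / 2) + n.toNat := by omega
        rw [e1, e2] at hloop
        -- B side: sel is the same window
        have hstart : (((base.length - 1) / 2 : Nat) : Int) - n / 2
            = ((((base.length - 1) / 2 - n.toNat / 2 : Nat)) : Int) := by omega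
        have hstop : (((base.length - 1) / 2 : Nat) : Int) - n / 2 + n
            = ((((base.length - 1) / 2 - n.toNat / 2 + n.toNat : Nat)) : Int) := by omega
        rw [hstop, hstart, PySem.List.slice_natCast]
        have hsel : List.take ((base.length - 1) / 2 - n.toNat / 2 + n.toNat
              - ((base.length - 1) / 2 - n.toNat / 2))
            (List.drop ((base.length - 1) / 2 - n.toNat / 2) base)
          = pvWin base ((base.length - 1) / 2 - n.toNat / 2)
              ((base.length - 1) / 2 - n.toNat / 2 + n.toNat) := rfl
        rw [hsel]
        set s0 : Nat := (base.length - 1) / 2 - n.toNat / 2 with hs0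
        set out : List String := pvLoopA base n (base.length : Int)
          ((((base.length - 1) / 2 : Nat) : Int) - 1)
          (((base.length - 1) / 2 + 1 : Nat) : Int) [base[(base.length - 1) / 2]] with hout
        have hwinlen : (pvWin base s0 (s0 + n.toNat)).length = n.toNat := by
          rw [pvWin_len base _ _ (by omega)]; omega
        -- pairs on the A side are a permutation of pairs on the B side
        have hzip : ((out.map (fun c => (((PySem.List.index? base c).getD 0 : Nat) : Int))).zip out)
            = out.map (fun c => ((((PySem.List.index? base c).getD 0 : Nat) : Int), c)) :=
          pvZipSelf _ out
        rw [hzip]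
        have hperm := List.Perm.map
          (fun c => ((((PySem.List.index? base c).getD 0 : Nat) : Int), c)) hloop
        rw [pvSorted2_eq_of_perm _ _ hperm]
        -- the final [:n] on the A side is a no-op
        have hlen : ((PySem.List.sorted2
            ((pvWin base s0 (s0 + n.toNat)).map
              (fun c => ((((PySem.List.index? base c).getD 0 : Nat) : Int), c)))
            Prod.fst Prod.snd).map (fun p => p.2)).length = n.toNat := by
          rw [List.length_map, (PySem.List.sorted2_perm _ _ _ _).length_eq, List.length_map,
            hwinlen]
        rw [PySem.List.slice_to _ (by omega), List.take_of_length_le (by omega)]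

-- ===== VERDICT (by name: the statement is the Claim_ definition above) =====
theorem diverging_center_out_py_spec : Claim_equal_diverging_center_out_py := by
  intro base n _ hpre
  unfold Spec_diverging_center_out_py
  exact pvMain base n hpre
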